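-- pv_equiv track=rewrite | github.com/sanyexieai/safetensors-viewer | viewer.py | organize_tensor_tree
-- ===== SOURCE A (Python) =====
-- def organize_tensor_tree(tensors):
--     # 组织层级结构
--     layers = {}
--     for key, info in tensors.items():
--         if "." in key:
--             layer_name, param_name = key.rsplit(".", 1)
--             if layer_name not in layers:
--                 layers[layer_name] = {}
--             layers[layer_name][param_name] = info
--         else:
--             if "root" not in layers:
--                 layers["root"] = {}
--             layers["root"][key] = info
--     return layers
-- ===== SOURCE B (Python) =====
-- def organize_tensor_tree(tensors):
--     # Two-pass grouping: compute the layer order once, then build each layer's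
--     # parameter dict in a single comprehension per layer.
--     def split_key(key):
--         if "." in key:
--             layer_name, param_name = key.rsplit(".", 1)
--             return layer_name, param_name
--         return "root", key
--
--     order = []
--     seen = set()
--     for key in tensors:
--         layer = split_key(key)[0]
--         if layer not in seen:
--             seen.add(layer)
--             order.append(layer)
--     return {layer: {split_key(key)[1]: info
--                     for key, info in tensors.items()
--                     if split_key(key)[0] == layer}
--             for layer in order}
-- ===== Notes on version B (the rewrite author's own statement) =====
-- stated objective: alternative
-- what changed: A builds the nested dict incrementally with a membership-check-then-insert inside one loop; B first collects the distinct layer names in one pass and then builds each layer's parameter dict with a per-layer grouping comprehension.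
import Mathlib
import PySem

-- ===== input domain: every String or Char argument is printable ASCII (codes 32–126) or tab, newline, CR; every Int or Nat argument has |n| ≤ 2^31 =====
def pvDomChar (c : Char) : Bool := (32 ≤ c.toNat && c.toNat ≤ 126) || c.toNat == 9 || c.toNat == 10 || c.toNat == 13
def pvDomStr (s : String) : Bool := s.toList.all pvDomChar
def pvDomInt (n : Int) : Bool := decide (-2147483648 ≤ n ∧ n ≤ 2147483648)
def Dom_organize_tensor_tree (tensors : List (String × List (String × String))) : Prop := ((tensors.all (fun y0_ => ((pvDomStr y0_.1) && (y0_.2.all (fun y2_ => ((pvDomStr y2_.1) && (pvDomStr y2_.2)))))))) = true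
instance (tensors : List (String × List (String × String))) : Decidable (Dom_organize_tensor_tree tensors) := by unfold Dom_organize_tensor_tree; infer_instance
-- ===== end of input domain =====

-- B replaces A's incremental membership-check insertion loop by a two-pass scheme: one pass
-- collecting the distinct layer names in first-occurrence order, then one grouping pass per layer
-- (objective: alternative — same result, including insertion order, different traversal).

-- ===== PORT A =====

-- key.rsplit(".", 1), used only when "." occurs in key: split at the LAST '.' (exact there;
-- PySem.Chars.rfind is s.rfind, the highest index of the separator).
def rsplitDot (key : String) : String × String :=
  let cs := key.toList
  let j := (PySem.Chars.rfind cs ['.']).toNat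
  (String.ofList (cs.take j), String.ofList (cs.drop (j + 1)))

-- Literal port of A: one loop; ensure the layer's inner dict exists, then set its param entry
-- (layers[layer][param] = info is Dict.modify at the present key; the default is never used).
def organize_tensor_tree (tensors : List (String × List (String × String))) : List (String × List (String × List (String × String))) :=
  (tensors.foldl
    (fun (layers : PySem.Dict String (PySem.Dict String (List (String × String)))) kv =>
      if PySem.Str.isIn "." kv.1 then
        let ln := (rsplitDot kv.1).1
        let pn := (rsplitDot kv.1).2
        let layers1 := if layers.contains ln then layers else layers.insert ln PySem.Dict.empty
        layers1.modify ln PySem.Dict.empty (fun d => d.insert pn kv.2)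
      else
        let layers1 := if layers.contains "root" then layers else layers.insert "root" PySem.Dict.empty
        layers1.modify "root" PySem.Dict.empty (fun d => d.insert kv.1 kv.2))
    PySem.Dict.empty).items.map (fun p => (p.1, p.2.items))

-- ===== PORT B =====

-- B's helper split_key(key) -> (layer_name, param_name).
def splitKeyB (key : String) : String × String :=
  if PySem.Str.isIn "." key then rsplitDot key else ("root", key)

-- Literal port of B: first the loop building `order` (first-occurrence distinct layers; `order`
-- and `seen` hold the same elements, which is exactly PySem.Set.add on one list), then the dict
-- comprehension per layer (iterate tensors, keep matching keys, insert params in order).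
def organize_tensor_tree_alt (tensors : List (String × List (String × String))) : List (String × List (String × List (String × String))) :=
  let order := tensors.foldl (fun (s : PySem.Set String) kv => s.add (splitKeyB kv.1).1) PySem.Set.empty
  order.map (fun layer =>
    (layer,
      (tensors.foldl
        (fun (d : PySem.Dict String (List (String × String))) kv =>
          if (splitKeyB kv.1).1 == layer then d.insert (splitKeyB kv.1).2 kv.2 else d)
        PySem.Dict.empty).items))

-- ===== PRECONDITION & SPEC =====
def Spec_organize_tensor_tree (tensors : List (String × List (String × String))) (out : List (String × List (String × List (String × String)))) : Prop := out = organize_tensor_tree_alt tensors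
instance (tensors : List (String × List (String × String))) (out : List (String × List (String × List (String × String)))) : Decidable (Spec_organize_tensor_tree tensors out) := by unfold Spec_organize_tensor_tree; infer_instance

-- ===== CLAIM (what is proved, stated in full; the proofs are below) =====
def Claim_equal_organize_tensor_tree : Prop := ∀ (tensors : List (String × List (String × String))), Dom_organize_tensor_tree tensors → Spec_organize_tensor_tree tensors (organize_tensor_tree tensors)

-- ===== LEMMAS AND PROOFS =====

-- A's loop body is a single Dict.modify at the split key (the "ensure {}" branch folds away).
lemma stepA_eq (layers : PySem.Dict String (PySem.Dict String (List (String × String))))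
    (kv : String × List (String × String)) :
    (if PySem.Str.isIn "." kv.1 then
        let ln := (rsplitDot kv.1).1
        let pn := (rsplitDot kv.1).2
        let layers1 := if layers.contains ln then layers else layers.insert ln PySem.Dict.empty
        layers1.modify ln PySem.Dict.empty (fun d => d.insert pn kv.2)
      else
        let layers1 := if layers.contains "root" then layers else layers.insert "root" PySem.Dict.empty
        layers1.modify "root" PySem.Dict.empty (fun d => d.insert kv.1 kv.2))
      = layers.modify (splitKeyB kv.1).1 PySem.Dict.empty (fun d => d.insert (splitKeyB kv.1).2 kv.2) := by
  unfold splitKeyB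
  by_cases hdot : PySem.Str.isIn "." kv.1
  · simp only [hdot, ite_true]
    by_cases hc : layers.contains ((rsplitDot kv.1).1)
    · simp [hc, PySem.Dict.modify]
    · rw [Bool.not_eq_true] at hc
      simp [hc, PySem.Dict.modify, PySem.Dict.insert_insert_self,
        PySem.Dict.getD_insert_self, PySem.Dict.getD_of_not_contains _ _ hc]
  · simp only [hdot, Bool.false_eq_true, ite_false]
    by_cases hc : layers.contains "root"
    · simp [hc, PySem.Dict.modify]
    · rw [Bool.not_eq_true] at hc
      simp [hc, PySem.Dict.modify, PySem.Dict.insert_insert_self,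
        PySem.Dict.getD_insert_self, PySem.Dict.getD_of_not_contains _ _ hc]

-- The outer fold's entry at c is the inner insert-fold over the keys whose layer is c.
lemma getD_foldA (ts : List (String × List (String × String)))
    (d : PySem.Dict String (PySem.Dict String (List (String × String)))) (c : String) :
    (ts.foldl (fun d kv => d.modify (splitKeyB kv.1).1 PySem.Dict.empty
        (fun inn => inn.insert (splitKeyB kv.1).2 kv.2)) d).getD c PySem.Dict.empty
      = ts.foldl (fun inn kv =>
          if (splitKeyB kv.1).1 == c then inn.insert (splitKeyB kv.1).2 kv.2 else inn)
        (d.getD c PySem.Dict.empty) := by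
  induction ts generalizing d with
  | nil => rfl
  | cons kv rest ih =>
      rw [List.foldl_cons, List.foldl_cons, ih, PySem.Dict.getD_modify]
      by_cases h : (splitKeyB kv.1).1 = c
      · simp [h]
      · simp [h, Ne.symm h]

-- ===== VERDICT (by name: the statement is the Claim_ definition above) =====
theorem organize_tensor_tree_spec : Claim_equal_organize_tensor_tree := by
  intro ts _
  show organize_tensor_tree ts = organize_tensor_tree_alt ts
  unfold organize_tensor_tree organize_tensor_tree_alt
  have hf : (fun (layers : PySem.Dict String (PySem.Dict String (List (String × String)))) (kv : String × List (String × String)) =>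
      if PySem.Str.isIn "." kv.1 then
        let ln := (rsplitDot kv.1).1
        let pn := (rsplitDot kv.1).2
        let layers1 := if layers.contains ln then layers else layers.insert ln PySem.Dict.empty
        layers1.modify ln PySem.Dict.empty (fun d => d.insert pn kv.2)
      else
        let layers1 := if layers.contains "root" then layers else layers.insert "root" PySem.Dict.empty
        layers1.modify "root" PySem.Dict.empty (fun d => d.insert kv.1 kv.2))
      = (fun layers kv => layers.modify (splitKeyB kv.1).1 PySem.Dict.empty
          (fun d => d.insert (splitKeyB kv.1).2 kv.2)) := by
    funext layers kv; exact stepA_eq layers kv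
  rw [hf]
  set dA := ts.foldl (fun layers kv => layers.modify (splitKeyB kv.1).1 PySem.Dict.empty
      (fun d => d.insert (splitKeyB kv.1).2 kv.2)) PySem.Dict.empty with hdA
  have hnd : dA.keys.Nodup := by
    exact PySem.Dict.nodup_keys_foldl_modify_key ts (fun kv => (splitKeyB kv.1).1)
      PySem.Dict.empty (fun _ kv => fun inn => inn.insert (splitKeyB kv.1).2 kv.2)
      PySem.Dict.empty PySem.Dict.nodup_keys_empty
  have hkeys : dA.keys = PySem.Set.ofList (ts.map (fun kv => (splitKeyB kv.1).1)) := by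
    rw [hdA, PySem.Dict.keys_foldl_modify_key ts (fun kv => (splitKeyB kv.1).1)
      PySem.Dict.empty (fun _ kv => fun inn => inn.insert (splitKeyB kv.1).2 kv.2)]
    simp [PySem.Dict.keys_empty, PySem.Set.update_nil_left]
  have horder : ts.foldl (fun (s : PySem.Set String) kv => s.add (splitKeyB kv.1).1) PySem.Set.empty
      = PySem.Set.ofList (ts.map (fun kv => (splitKeyB kv.1).1)) := by
    rw [← PySem.Set.update_map_eq_foldl_add]
    simp [PySem.Set.empty, PySem.Set.update_nil_left]
  rw [PySem.Dict.items_eq_map_keys dA hnd PySem.Dict.empty, hkeys, horder, List.map_map]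
  refine List.map_congr_left (fun c _ => ?_)
  simp only [Function.comp]
  rw [hdA, getD_foldA]
  simp [PySem.Dict.getD_empty]
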